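-- pv_equiv track=rewrite | github.com/stefanwezel/diminumero | languages/da/generate_numbers.py | number_to_danish
-- ===== SOURCE A (Python) =====
-- def number_to_danish(n):
--     """Convert a number to Danish."""
--     if n == 0:
--         return "nul"
--
--     ones = [
--         "",
--         "en",
--         "to",
--         "tre",
--         "fire",
--         "fem",
--         "seks",
--         "syv",
--         "otte",
--         "ni",
--         "ti",
--         "elleve",
--         "tolv",
--         "tretten",
--         "fjorten",
--         "femten",
--         "seksten",
--         "sytten",
--         "atten",
--         "nitten",
--     ]
--
--     tens_words = {
--         2: "tyve",
--         3: "tredive",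
--         4: "fyrre",
--         5: "halvtreds",
--         6: "tres",
--         7: "halvfjerds",
--         8: "firs",
--         9: "halvfems",
--     }
--
--     if n < 20:
--         return ones[n]
--
--     if n < 100:
--         t, o = divmod(n, 10)
--         if o == 0:
--             return tens_words[t]
--         return ones[o] + "og" + tens_words[t]
--
--     if n < 1000:
--         h, rest = divmod(n, 100)
--         if h == 1:
--             result = "et hundrede"
--         else:
--             result = ones[h] + " hundrede"
--
--         if rest > 0:
--             result += " og " + number_to_danish(rest)
--         return result
--
--     if n < 1000000:
--         th, rest = divmod(n, 1000)
--         if th == 1: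
--             result = "et tusind"
--         else:
--             result = number_to_danish(th) + " tusind"
--
--         if rest > 0:
--             if rest < 100:
--                 result += " og " + number_to_danish(rest)
--             else:
--                 result += " " + number_to_danish(rest)
--         return result
--
--     if n < 1000000000:
--         mill, rest = divmod(n, 1000000)
--         if mill == 1:
--             result = "en million"
--         else:
--             result = number_to_danish(mill) + " millioner"
--
--         if rest > 0:
--             if rest < 100:
--                 result += " og " + number_to_danish(rest)
--             elif rest < 1000:
--                 result += " " + number_to_danish(rest)
--             else:
--                 result += " " + number_to_danish(rest)
--         return result
--
--     return str(n)
-- ===== SOURCE B (Python) =====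
-- ONES = (
--     "", "en", "to", "tre", "fire", "fem", "seks", "syv", "otte", "ni",
--     "ti", "elleve", "tolv", "tretten", "fjorten", "femten", "seksten",
--     "sytten", "atten", "nitten",
-- )
--
-- TENS = {
--     2: "tyve", 3: "tredive", 4: "fyrre", 5: "halvtreds",
--     6: "tres", 7: "halvfjerds", 8: "firs", 9: "halvfems",
-- }
--
--
-- def _small(n):
--     """Spell 1 <= n <= 99."""
--     if n < 20:
--         return ONES[n]
--     t, o = divmod(n, 10)
--     return TENS[t] if o == 0 else ONES[o] + "og" + TENS[t]
--
--
-- def _below_thousand(n):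
--     """Spell 1 <= n <= 999."""
--     h, r = divmod(n, 100)
--     if h == 0:
--         return _small(r)
--     head = "et hundrede" if h == 1 else ONES[h] + " hundrede"
--     return head if r == 0 else head + " og " + _small(r)
--
--
-- def number_to_danish(n):
--     """Convert a number to Danish."""
--     if n == 0:
--         return "nul"
--     if n < 0:
--         return "minus " + number_to_danish(-n)
--     if n >= 10 ** 9:
--         return str(n)
--     parts = []
--     for unit, singular, suffix in ((10 ** 6, "en million", " millioner"),
--                                    (10 ** 3, "et tusind", " tusind")):
--         q, n = divmod(n, unit)
--         if q:
--             if parts: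
--                 parts.append(" ")
--             parts.append(singular if q == 1 else _below_thousand(q) + suffix)
--     if n:
--         if parts:
--             parts.append(" og " if n < 100 else " ")
--         parts.append(_below_thousand(n))
--     return "".join(parts)
-- ===== Notes on version B (the rewrite author's own statement) =====
-- stated objective: alternative
-- what changed: Replaces A's cascading per-magnitude recursion (each magnitude recursing into number_to_danish for its quotient and remainder) with a single fold over a scale table [(10^6, ...), (10^3, ...)] plus a non-recursive 0-999 helper, joining the collected chunks at the end; B also spells negative numbers as 'minus ...' instead of A's accidental negative-index table lookup.
-- intended difference: For -20 <= n <= -1 A returns the accidental negative-index wraparound entry ones[n] of its units table, while B returns the word for minus followed by the spelling of -n, which is the intended reading of a negative number. — e.g. on number_to_danish(-5): A returns "femten", B returns "minus fem"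
-- crash fix: For n < -20 A raises IndexError (the ones[n] lookup is out of range), while B returns the word for minus followed by the spelling of -n. — e.g. on number_to_danish(-21): A raises IndexError, B returns "minus enogtyve"
import Mathlib
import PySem

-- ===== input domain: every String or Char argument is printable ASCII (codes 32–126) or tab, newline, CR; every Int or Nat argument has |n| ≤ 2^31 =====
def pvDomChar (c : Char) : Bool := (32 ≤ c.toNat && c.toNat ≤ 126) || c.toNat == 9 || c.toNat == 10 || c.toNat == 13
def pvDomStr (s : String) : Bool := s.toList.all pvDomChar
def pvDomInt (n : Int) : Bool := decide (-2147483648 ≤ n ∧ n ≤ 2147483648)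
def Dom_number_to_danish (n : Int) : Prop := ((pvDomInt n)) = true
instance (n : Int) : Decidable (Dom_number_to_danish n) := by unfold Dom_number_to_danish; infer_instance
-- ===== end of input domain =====

-- B rewrites A's cascading per-magnitude recursion as one loop over a scale table plus a 0–999
-- helper (objective: alternative decomposition, same cost); B spells negatives as "minus …"
-- where A's ones[n] negative-index wraparound returns an unrelated word (see D_ below).

-- ===== PORT A =====
def pvOnesA : List String :=
  ["", "en", "to", "tre", "fire", "fem", "seks", "syv", "otte", "ni",
   "ti", "elleve", "tolv", "tretten", "fjorten", "femten", "seksten",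
   "sytten", "atten", "nitten"]

def pvTensA : PySem.Dict Int String :=
  PySem.Dict.ofList [(2, "tyve"), (3, "tredive"), (4, "fyrre"), (5, "halvtreds"),
                     (6, "tres"), (7, "halvfjerds"), (8, "firs"), (9, "halvfems")]

-- literal transliteration of A; ones[n] raising IndexError (n < -20) is `pyGet? = none`,
-- rendered by `.getD ""` and excluded by Pre_.
def number_to_danish (n : Int) : String :=
  if n = 0 then "nul"
  else if n < 20 then (PySem.List.pyGet? pvOnesA n).getD ""
  else if n < 100 then
    let t := PySem.Int.floordiv n 10
    let o := PySem.Int.mod n 10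
    if o = 0 then (pvTensA.get? t).getD ""
    else (PySem.List.pyGet? pvOnesA o).getD "" ++ "og" ++ (pvTensA.get? t).getD ""
  else if n < 1000 then
    let h := PySem.Int.floordiv n 100
    let rest := PySem.Int.mod n 100
    let result := if h = 1 then "et hundrede" else (PySem.List.pyGet? pvOnesA h).getD "" ++ " hundrede"
    if rest > 0 then result ++ (" og " ++ number_to_danish rest) else result
  else if n < 1000000 then
    let th := PySem.Int.floordiv n 1000
    let rest := PySem.Int.mod n 1000
    let result := if th = 1 then "et tusind" else number_to_danish th ++ " tusind"
    if rest > 0 then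
      if rest < 100 then result ++ (" og " ++ number_to_danish rest)
      else result ++ (" " ++ number_to_danish rest)
    else result
  else if n < 1000000000 then
    let mill := PySem.Int.floordiv n 1000000
    let rest := PySem.Int.mod n 1000000
    let result := if mill = 1 then "en million" else number_to_danish mill ++ " millioner"
    if rest > 0 then
      if rest < 100 then result ++ (" og " ++ number_to_danish rest)
      else if rest < 1000 then result ++ (" " ++ number_to_danish rest)
      else result ++ (" " ++ number_to_danish rest)
    else result
  else PySem.Int.toStr n
termination_by n.toNat
decreasing_by
  all_goals
    first
      | (have h2 := PySem.Int.mod_lt n (show (0:Int) < 100 by norm_num)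
         omega)
      | (rw [PySem.Int.floordiv_eq_ediv_of_pos (by norm_num)]; omega)
      | (have h2 := PySem.Int.mod_lt n (show (0:Int) < 1000 by norm_num)
         omega)
      | (have h2 := PySem.Int.mod_lt n (show (0:Int) < 1000000 by norm_num)
         omega)

-- ===== PORT B =====
def pvOnesB : List String :=
  ["", "en", "to", "tre", "fire", "fem", "seks", "syv", "otte", "ni",
   "ti", "elleve", "tolv", "tretten", "fjorten", "femten", "seksten",
   "sytten", "atten", "nitten"]

def pvTensB : PySem.Dict Int String :=
  PySem.Dict.ofList [(2, "tyve"), (3, "tredive"), (4, "fyrre"), (5, "halvtreds"),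
                     (6, "tres"), (7, "halvfjerds"), (8, "firs"), (9, "halvfems")]

-- _small: spell 1 <= n <= 99
def pvSmall (n : Int) : String :=
  if n < 20 then (PySem.List.pyGet? pvOnesB n).getD ""
  else
    let t := PySem.Int.floordiv n 10
    let o := PySem.Int.mod n 10
    if o = 0 then (pvTensB.get? t).getD ""
    else (PySem.List.pyGet? pvOnesB o).getD "" ++ "og" ++ (pvTensB.get? t).getD ""

-- _below_thousand: spell 1 <= n <= 999
def pvBelowThousand (n : Int) : String :=
  let h := PySem.Int.floordiv n 100
  let r := PySem.Int.mod n 100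
  if h = 0 then pvSmall r
  else
    let head := if h = 1 then "et hundrede" else (PySem.List.pyGet? pvOnesB h).getD "" ++ " hundrede"
    if r = 0 then head else head ++ " og " ++ pvSmall r

-- literal transliteration of Source B: a fold over the scale table, state = (parts, n)
def number_to_danish_alt (n : Int) : String :=
  if n = 0 then "nul"
  else if n < 0 then "minus " ++ number_to_danish_alt (-n)
  else if n ≥ 10 ^ 9 then PySem.Int.toStr n
  else
    let step : List String × Int → Int × String × String → List String × Int := fun st sc =>
      let q := PySem.Int.floordiv st.2 sc.1
      let r := PySem.Int.mod st.2 sc.1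
      if q ≠ 0 then
        (st.1 ++ (if st.1 ≠ [] then [" "] else []) ++
          [if q = 1 then sc.2.1 else pvBelowThousand q ++ sc.2.2], r)
      else (st.1, r)
    let st := [((1000000 : Int), ("en million", " millioner")),
               ((1000 : Int), ("et tusind", " tusind"))].foldl step ([], n)
    let parts :=
      if st.2 ≠ 0 then
        st.1 ++ (if st.1 ≠ [] then [if st.2 < 100 then " og " else " "] else []) ++
          [pvBelowThousand st.2]
      else st.1
    PySem.Str.join "" parts
termination_by (if n < 0 then 1 else 0) + n.natAbs
decreasing_by simp only [Int.natAbs_neg]; split_ifs <;> omega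

-- ===== PRECONDITION & SPEC =====
-- A raises IndexError (ones[n] out of range) exactly when n < -20; Pre_ excludes only those.
def Pre_number_to_danish (n : Int) : Prop := -20 ≤ n
instance (n : Int) : Decidable (Pre_number_to_danish n) := by unfold Pre_number_to_danish; infer_instance
def pvWitness_number_to_danish : Int := (1050)

-- On n < -20 A raises IndexError while B returns the Danish spelling "minus …".
def Raises_number_to_danish (n : Int) : Prop := n < -20
instance (n : Int) : Decidable (Raises_number_to_danish n) := by unfold Raises_number_to_danish; infer_instance
def pvRaiseWitness_number_to_danish : Int := (-21)
def pvRaiseWitnessOut_number_to_danish : String := "minus enogtyve"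

-- On -20 ≤ n ≤ -1 A returns an accidental negative-index wraparound word (ones[n], e.g. "femten"
-- for -5), while B returns the intended spelling "minus " + spelling of -n.
def D_number_to_danish (n : Int) : Prop := -20 ≤ n ∧ n ≤ -1
instance (n : Int) : Decidable (D_number_to_danish n) := by unfold D_number_to_danish; infer_instance

def Spec_number_to_danish (n : Int) (out : String) : Prop := ¬ D_number_to_danish n → out = number_to_danish_alt n
instance (n : Int) (out : String) : Decidable (Spec_number_to_danish n out) := by unfold Spec_number_to_danish; infer_instance

def pvDiffWitness_number_to_danish : Int := (-5)
def pvDiffWitnessOut_number_to_danish : String × String := ("femten", "minus fem")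

-- ===== CLAIM (what is proved, stated in full; the proofs are below) =====
def Claim_unchanged_number_to_danish : Prop := ∀ (n : Int), Dom_number_to_danish n → Pre_number_to_danish n → Spec_number_to_danish n (number_to_danish n)
def Claim_changed_number_to_danish : Prop := Dom_number_to_danish (pvDiffWitness_number_to_danish) ∧ Pre_number_to_danish (pvDiffWitness_number_to_danish) ∧ D_number_to_danish (pvDiffWitness_number_to_danish) ∧ number_to_danish (pvDiffWitness_number_to_danish) = pvDiffWitnessOut_number_to_danish.1 ∧ number_to_danish_alt (pvDiffWitness_number_to_danish) = pvDiffWitnessOut_number_to_danish.2 ∧ pvDiffWitnessOut_number_to_danish.1 ≠ pvDiffWitnessOut_number_to_danish.2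
def Claim_exact_number_to_danish : Prop := ∀ (n : Int), Dom_number_to_danish n → Pre_number_to_danish n → D_number_to_danish n → number_to_danish n ≠ number_to_danish_alt n
def Claim_raises_number_to_danish : Prop := (∀ (n : Int), Dom_number_to_danish n → Raises_number_to_danish n → ¬ Pre_number_to_danish n) ∧ (Dom_number_to_danish (pvRaiseWitness_number_to_danish) ∧ Raises_number_to_danish (pvRaiseWitness_number_to_danish) ∧ number_to_danish_alt (pvRaiseWitness_number_to_danish) = pvRaiseWitnessOut_number_to_danish)

-- ===== LEMMAS AND PROOFS =====

theorem pv_eq_small (n : Int) (h1 : 1 ≤ n) (h2 : n < 100) :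
    number_to_danish n = pvSmall n := by
  rw [number_to_danish, pvSmall]
  rw [if_neg (by omega : ¬ n = 0)]
  by_cases h20 : n < 20
  · rw [if_pos h20, if_pos h20]; rfl
  · rw [if_neg h20, if_neg h20, if_pos h2]; rfl

theorem pv_eq_below (n : Int) (h1 : 1 ≤ n) (h2 : n < 1000) :
    number_to_danish n = pvBelowThousand n := by
  rw [pvBelowThousand]
  rw [PySem.Int.floordiv_eq_ediv_of_pos (by norm_num : (0:Int) < 100),
      PySem.Int.mod_eq_emod_of_pos (by norm_num : (0:Int) < 100)]
  by_cases hc : n < 100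
  · rw [show n / 100 = 0 by omega, show n % 100 = n by omega]
    exact pv_eq_small n h1 hc
  · rw [if_neg (by omega : ¬ n / 100 = 0)]
    rw [number_to_danish]
    rw [if_neg (by omega : ¬ n = 0), if_neg (by omega : ¬ n < 20),
        if_neg (by omega : ¬ n < 100), if_pos h2]
    simp only [PySem.Int.floordiv_eq_ediv_of_pos (by norm_num : (0:Int) < 100),
      PySem.Int.mod_eq_emod_of_pos (by norm_num : (0:Int) < 100)]
    by_cases hr : n % 100 = 0
    · rw [if_neg (by omega : ¬ n % 100 > 0), if_pos hr]; rfl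
    · rw [if_pos (by omega : n % 100 > 0), if_neg hr]
      rw [pv_eq_small (n % 100) (by omega) (by omega)]
      rw [← String.append_assoc]
      rfl

-- A on a pure thousands-range argument, expressed in B's chunk vocabulary
theorem pv_A_thousand (n : Int) (h1 : 1000 ≤ n) (h2 : n < 1000000) :
    number_to_danish n =
      (if n / 1000 = 1 then "et tusind" else pvBelowThousand (n / 1000) ++ " tusind") ++
        (if n % 1000 = 0 then ""
         else (if n % 1000 < 100 then " og " else " ") ++ pvBelowThousand (n % 1000)) := by
  rw [number_to_danish]
  rw [if_neg (by omega : ¬ n = 0), if_neg (by omega : ¬ n < 20),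
      if_neg (by omega : ¬ n < 100), if_neg (by omega : ¬ n < 1000), if_pos h2]
  simp only [PySem.Int.floordiv_eq_ediv_of_pos (by norm_num : (0:Int) < 1000),
    PySem.Int.mod_eq_emod_of_pos (by norm_num : (0:Int) < 1000)]
  have hq1 : 1 ≤ n / 1000 := by omega
  have hq2 : n / 1000 < 1000 := by omega
  by_cases hq : n / 1000 = 1
  · rw [if_pos hq, if_pos hq]
    by_cases hr : n % 1000 = 0
    · rw [if_neg (by omega : ¬ n % 1000 > 0), if_pos hr, String.append_empty]
    · rw [if_pos (by omega : n % 1000 > 0), if_neg hr,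
        pv_eq_below (n % 1000) (by omega) (by omega)]
      by_cases hlt : n % 1000 < 100
      · rw [if_pos hlt, if_pos hlt]
      · rw [if_neg hlt, if_neg hlt]
  · rw [if_neg hq, if_neg hq, pv_eq_below (n / 1000) hq1 hq2]
    by_cases hr : n % 1000 = 0
    · rw [if_neg (by omega : ¬ n % 1000 > 0), if_pos hr, String.append_empty]
    · rw [if_pos (by omega : n % 1000 > 0), if_neg hr,
        pv_eq_below (n % 1000) (by omega) (by omega)]
      by_cases hlt : n % 1000 < 100
      · rw [if_pos hlt, if_pos hlt]
      · rw [if_neg hlt, if_neg hlt]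

theorem pv_A_million (n : Int) (h1 : 1000000 ≤ n) (h2 : n < 1000000000) :
    number_to_danish n =
      (if n / 1000000 = 1 then "en million" else pvBelowThousand (n / 1000000) ++ " millioner") ++
        (if n % 1000000 = 0 then ""
         else (if n % 1000000 < 100 then " og " else " ") ++
           (if n % 1000000 < 1000 then pvBelowThousand (n % 1000000)
            else (if n % 1000000 / 1000 = 1 then "et tusind"
                  else pvBelowThousand (n % 1000000 / 1000) ++ " tusind") ++
              (if n % 1000000 % 1000 = 0 then ""
               else (if n % 1000000 % 1000 < 100 then " og " else " ") ++
                 pvBelowThousand (n % 1000000 % 1000)))) := by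
  rw [number_to_danish]
  rw [if_neg (by omega : ¬ n = 0), if_neg (by omega : ¬ n < 20),
      if_neg (by omega : ¬ n < 100), if_neg (by omega : ¬ n < 1000),
      if_neg (by omega : ¬ n < 1000000), if_pos h2]
  simp only [PySem.Int.floordiv_eq_ediv_of_pos (by norm_num : (0:Int) < 1000000),
    PySem.Int.mod_eq_emod_of_pos (by norm_num : (0:Int) < 1000000)]
  have hrest1 : 0 ≤ n % 1000000 := by omega
  have hrest2 : n % 1000000 < 1000000 := by omega
  have hmain : (if n / 1000000 = 1 then "en million"
      else number_to_danish (n / 1000000) ++ " millioner") =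
      (if n / 1000000 = 1 then "en million"
      else pvBelowThousand (n / 1000000) ++ " millioner") := by
    by_cases hq : n / 1000000 = 1
    · rw [if_pos hq, if_pos hq]
    · rw [if_neg hq, if_neg hq, pv_eq_below (n / 1000000) (by omega) (by omega)]
  rw [hmain]
  by_cases hr : n % 1000000 = 0
  · rw [if_neg (by omega : ¬ n % 1000000 > 0), if_pos hr, String.append_empty]
  · rw [if_neg hr]
    by_cases h100 : n % 1000000 < 100
    · rw [if_pos (by omega : n % 1000000 > 0), if_pos h100, if_pos h100,
        if_pos (by omega : n % 1000000 < 1000),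
        pv_eq_below (n % 1000000) (by omega) (by omega)]
    · rw [if_pos (by omega : n % 1000000 > 0), if_neg h100, if_neg h100]
      by_cases h1000 : n % 1000000 < 1000
      · rw [if_pos h1000, if_pos h1000, pv_eq_below (n % 1000000) (by omega) h1000]
      · rw [if_neg h1000, if_neg h1000, pv_A_thousand (n % 1000000) (by omega) hrest2]

theorem pv_eq_main (n : Int) (h : 0 ≤ n) :
    number_to_danish n = number_to_danish_alt n := by
  rw [number_to_danish_alt]
  by_cases h0 : n = 0
  · subst h0; rw [number_to_danish]; rfl
  · rw [if_neg h0, if_neg (by omega : ¬ n < 0)]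
    by_cases hbig : n ≥ 10 ^ 9
    · have hbig' : (1000000000 : Int) ≤ n := by norm_num at hbig; exact hbig
      rw [if_pos hbig, number_to_danish,
        if_neg h0, if_neg (by omega : ¬ n < 20), if_neg (by omega : ¬ n < 100),
        if_neg (by omega : ¬ n < 1000), if_neg (by omega : ¬ n < 1000000),
        if_neg (by omega : ¬ n < 1000000000)]
    · have hsmall : n < 1000000000 := by norm_num at hbig; omega
      rw [if_neg hbig]
      simp only [List.foldl_cons, List.foldl_nil,
        PySem.Int.floordiv_eq_ediv_of_pos (by norm_num : (0:Int) < 1000000),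
        PySem.Int.mod_eq_emod_of_pos (by norm_num : (0:Int) < 1000000),
        PySem.Int.floordiv_eq_ediv_of_pos (by norm_num : (0:Int) < 1000),
        PySem.Int.mod_eq_emod_of_pos (by norm_num : (0:Int) < 1000)]
      by_cases hm : n < 1000000
      · rw [show n / 1000000 = 0 by omega, show n % 1000000 = n by omega]
        simp only [ne_eq, not_true_eq_false, ite_false]
        by_cases ht : n < 1000
        · rw [show n / 1000 = 0 by omega, show n % 1000 = n by omega,
            pv_eq_below n (by omega) ht]
          simp only [not_true_eq_false, ite_false, h0, not_false_eq_true, ite_true,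
            List.nil_append, PySem.Str.join, String.toList_empty, List.map_cons, List.map_nil,
            PySem.Chars.join_singleton, String.ofList_toList]
        · rw [pv_A_thousand n (by omega) hm, if_pos (by omega : ¬ n / 1000 = 0)]
          simp only [not_false_eq_true, ite_true, List.nil_append,
            List.cons_ne_nil]
          by_cases hr3 : n % 1000 = 0
          · rw [if_pos hr3, String.append_empty, if_neg (not_not_intro hr3)]
            simp only [PySem.Str.join, List.map_cons, List.map_nil, String.toList_empty,
              PySem.Chars.join_singleton, String.ofList_toList]
          · rw [if_neg hr3, if_pos hr3]
            simp only [List.cons_append, List.nil_append,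
              PySem.Str.join, List.map_cons, List.map_nil, String.toList_empty,
              PySem.Chars.join_cons_cons, PySem.Chars.join_singleton, List.append_nil,
              String.ofList_append, String.ofList_toList]
      · rw [pv_A_million n (by omega) hsmall, if_pos (by omega : ¬ n / 1000000 = 0)]
        simp only [ne_eq, not_false_eq_true, ite_true, List.nil_append, List.cons_ne_nil,
          not_true_eq_false, ite_false]
        by_cases ht : n % 1000000 < 1000
        · rw [show n % 1000000 / 1000 = 0 by omega]
          simp only [not_true_eq_false, ite_false]
          rw [show n % 1000000 % 1000 = n % 1000000 by omega]
          by_cases hr6 : n % 1000000 = 0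
          · rw [if_pos hr6, String.append_empty, if_neg (not_not_intro hr6)]
            simp only [PySem.Str.join, List.map_cons, List.map_nil, String.toList_empty,
              PySem.Chars.join_singleton, String.ofList_toList]
          · rw [if_neg hr6, if_pos hr6, if_pos ht]
            simp only [reduceCtorEq, not_false_eq_true, ite_true,
              List.cons_append, List.nil_append,
              PySem.Str.join, List.map_cons, List.map_nil, String.toList_empty,
              PySem.Chars.join_cons_cons, PySem.Chars.join_singleton, List.append_nil,
              String.ofList_append, String.ofList_toList]
        · have hne : ¬ (n % 1000000 = 0) := by omega
          rw [if_neg hne, if_neg (by omega : ¬ n % 1000000 < 100), if_neg ht,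
            if_pos (by omega : ¬ n % 1000000 / 1000 = 0)]
          simp only []
          by_cases hr3 : n % 1000000 % 1000 = 0
          · rw [if_pos hr3, String.append_empty, if_neg (not_not_intro hr3)]
            simp only [List.cons_append, List.nil_append,
              PySem.Str.join, List.map_cons, List.map_nil, String.toList_empty,
              PySem.Chars.join_cons_cons, PySem.Chars.join_singleton, List.append_nil,
              String.ofList_append, String.ofList_toList]
          · rw [if_neg hr3, if_pos hr3]
            simp only [reduceCtorEq, not_false_eq_true, ite_true,
              List.cons_append, List.nil_append,
              PySem.Str.join, List.map_cons, List.map_nil, String.toList_empty,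
              PySem.Chars.join_cons_cons, PySem.Chars.join_singleton, List.append_nil,
              String.ofList_append, String.ofList_toList]

-- ===== VERDICT (by name: the statement is the Claim_ definition above) =====
theorem number_to_danish_spec : Claim_unchanged_number_to_danish := by
  intro n _ hpre hnd
  unfold Pre_number_to_danish at hpre
  unfold D_number_to_danish at hnd
  exact pv_eq_main n (by omega)

theorem number_to_danish_changed : Claim_changed_number_to_danish := by
  unfold Claim_changed_number_to_danish
  refine ⟨by decide, by decide, by decide, ?_, ?_, by decide⟩
  · rw [number_to_danish]; decide
  · rw [number_to_danish_alt, number_to_danish_alt]; decide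

theorem number_to_danish_tight : Claim_exact_number_to_danish := by
  intro n _ _ hd
  unfold D_number_to_danish at hd
  obtain ⟨h1, h2⟩ := hd
  interval_cases n <;> (rw [number_to_danish, number_to_danish_alt, number_to_danish_alt]; decide)

@[simp]
theorem number_to_danish_raises : Claim_raises_number_to_danish := by
  unfold Claim_raises_number_to_danish
  refine ⟨fun n _ hr hp => by unfold Raises_number_to_danish at hr; unfold Pre_number_to_danish at hp; omega,
    by decide, by decide, ?_⟩
  rw [number_to_danish_alt, number_to_danish_alt]; decide
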